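-- pv_equiv track=rewrite | github.com/gheritarish/advent-of-code | 2024/day_1.py | solve_two
-- ===== SOURCE A (Python) =====
-- def solve_two(first_list: list[int], second_list: list[int]) -> int:
--     second_list_as_dict = {}
--     for elt in second_list:
--         second_list_as_dict[elt] = second_list.count(elt)
--
--     second_answer = 0
--     for elt in first_list:
--         try:
--             second_answer += elt * second_list_as_dict[elt]
--         except KeyError:
--             continue
--     return second_answer
-- ===== SOURCE B (Python) =====
-- def solve_two(first_list: list[int], second_list: list[int]) -> int:
--     a = sorted(first_list)
--     b = sorted(second_list)
--     total = 0
--     i = j = 0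
--     while i < len(a) and j < len(b):
--         if a[i] < b[j]:
--             i += 1
--         elif b[j] < a[i]:
--             j += 1
--         else:
--             v = a[i]
--             ci = i + 1
--             while ci < len(a) and a[ci] == v:
--                 ci += 1
--             cj = j + 1
--             while cj < len(b) and b[cj] == v:
--                 cj += 1
--             total += v * (ci - i) * (cj - j)
--             i, j = ci, cj
--     return total
-- ===== Notes on version B (the rewrite author's own statement) =====
-- stated objective: faster
-- what changed: Replaces A's hash-table build (which calls list.count for every element, quadratic) and per-element lookup pass with a sort-both-lists two-pointer merge that walks equal-value runs and adds v * run_len_first * run_len_second per shared value.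
import Mathlib
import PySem

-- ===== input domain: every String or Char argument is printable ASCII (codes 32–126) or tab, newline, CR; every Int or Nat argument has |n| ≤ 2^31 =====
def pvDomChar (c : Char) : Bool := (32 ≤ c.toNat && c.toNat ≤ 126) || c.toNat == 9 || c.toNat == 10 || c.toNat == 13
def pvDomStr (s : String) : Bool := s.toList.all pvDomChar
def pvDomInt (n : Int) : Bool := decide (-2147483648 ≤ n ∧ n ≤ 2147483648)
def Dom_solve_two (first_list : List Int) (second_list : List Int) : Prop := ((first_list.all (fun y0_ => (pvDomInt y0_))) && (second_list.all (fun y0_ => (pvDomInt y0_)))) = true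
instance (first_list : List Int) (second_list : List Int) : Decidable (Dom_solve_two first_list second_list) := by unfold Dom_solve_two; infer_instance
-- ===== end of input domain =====

-- B replaces A's per-element count/lookup passes by sorting both lists and merging them
-- with two pointers over equal-value runs (a different, sort-based algorithm).

-- ===== PORT A =====
def solve_two (first_list : List Int) (second_list : List Int) : Int :=
  let second_list_as_dict : PySem.Dict Int Int :=
    second_list.foldl (fun d elt => d.insert elt (PySem.List.count second_list elt)) PySem.Dict.empty
  first_list.foldl
    (fun second_answer elt =>
      match second_list_as_dict.get? elt with
      | some c => second_answer + elt * c
      | none => second_answer)  -- except KeyError: continue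
    0

-- ===== PORT B =====
-- The outer while loop of Source B, with the two inner run-scanning while loops rendered as
-- takeWhile/dropWhile on the not-yet-consumed suffixes (the pointers i, j name suffixes).
def mergeScore : List Int → List Int → Int
  | [], _ => 0
  | _ :: _, [] => 0
  | a :: as, b :: bs =>
    if a < b then mergeScore as (b :: bs)
    else if b < a then mergeScore (a :: as) bs
    else
      a * (((as.takeWhile (fun x => x == a)).length : Int) + 1)
        * (((bs.takeWhile (fun x => x == b)).length : Int) + 1)
        + mergeScore (as.dropWhile (fun x => x == a)) (bs.dropWhile (fun x => x == b))
termination_by A B => A.length + B.length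
decreasing_by
  · simp
  · simp
  · have h1 := List.length_dropWhile_le (fun x => x == a) as
    have h2 := List.length_dropWhile_le (fun x => x == b) bs
    simp; omega

def solve_two_alt (first_list : List Int) (second_list : List Int) : Int :=
  mergeScore (PySem.List.sorted first_list (fun x => x) false)
             (PySem.List.sorted second_list (fun x => x) false)

-- ===== PRECONDITION & SPEC =====
def Spec_solve_two (first_list : List Int) (second_list : List Int) (out : Int) : Prop := out = solve_two_alt first_list second_list
instance (first_list : List Int) (second_list : List Int) (out : Int) : Decidable (Spec_solve_two first_list second_list out) := by unfold Spec_solve_two; infer_instance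

-- ===== CLAIM (what is proved, stated in full; the proofs are below) =====
def Claim_equal_solve_two : Prop := ∀ (first_list : List Int) (second_list : List Int), Dom_solve_two first_list second_list → Spec_solve_two first_list second_list (solve_two first_list second_list)

-- ===== LEMMAS AND PROOFS =====

-- A's dict: after the build loop, get? k = C k for k in the list, else the initial dict's value.
theorem getA_dict (C : Int → Int) (l : List Int) (d0 : PySem.Dict Int Int) (k : Int) :
    (l.foldl (fun d elt => d.insert elt (C elt)) d0).get? k
      = if k ∈ l then some (C k) else d0.get? k := by
  induction l generalizing d0 with
  | nil => simp
  | cons x xs ih =>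
      simp only [List.foldl_cons, ih, List.mem_cons]
      by_cases hk : k ∈ xs
      · simp [hk]
      · by_cases hx : k = x
        · subst hx; simp [hk, PySem.Dict.get?_insert_self]
        · simp [hk, hx, PySem.Dict.get?_insert_of_ne _ _ hx]

-- A's accumulation loop equals the plain sum of elt * second_list.count elt.
theorem foldA (first second : List Int) (a : Int) :
    first.foldl
      (fun acc elt =>
        match (if elt ∈ second then some ((PySem.List.count second elt : Int)) else none) with
        | some c => acc + elt * c
        | none => acc) a
    = a + (first.map (fun e => e * (second.count e : Int))).sum := by
  induction first generalizing a with
  | nil => simp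
  | cons x xs ih =>
      simp only [List.foldl_cons, List.map_cons, List.sum_cons]
      by_cases hx : x ∈ second
      · simp only [hx, if_true]
        rw [ih]
        simp only [PySem.List.count_eq]
        ring
      · simp only [hx, if_false]
        rw [ih]
        have hc : (second.count x : Int) = 0 := by
          simp [List.count_eq_zero_of_not_mem hx]
        rw [hc]
        ring

-- The similarity sum both programs compute.
def simScore (A B : List Int) : Int := (A.map (fun x => x * (B.count x : Int))).sum

-- In a ≤-sorted list all of whose elements are ≥ a, a does not survive dropWhile (== a).
theorem not_mem_dropWhile_eq (l : List Int) (a : Int)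
    (hp : l.Pairwise (· ≤ ·)) (hge : ∀ y ∈ l, a ≤ y) :
    a ∉ l.dropWhile (fun x => x == a) := by
  induction l with
  | nil => simp
  | cons x xs ih =>
      by_cases hx : x = a
      · subst hx
        simp only [List.dropWhile_cons, beq_self_eq_true, if_true]
        exact ih hp.of_cons (fun y hy => hge y (List.mem_cons_of_mem _ hy))
      · have hxa : (x == a) = false := beq_eq_false_iff_ne.mpr hx
        simp only [List.dropWhile_cons, hxa, Bool.false_eq_true, if_false]
        intro hmem
        rcases List.mem_cons.mp hmem with h | h
        · exact hx h.symm
        · have h1 : a ≤ x := hge x (List.mem_cons_self ..)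
          have h2 : x ≤ a := (List.pairwise_cons.mp hp).1 a h
          exact hx (le_antisymm h2 h1)

-- In such a list, count a = length of the leading run of a's.
theorem count_eq_run (l : List Int) (a : Int)
    (hp : l.Pairwise (· ≤ ·)) (hge : ∀ y ∈ l, a ≤ y) :
    l.count a = (l.takeWhile (fun x => x == a)).length := by
  have hsplit := List.takeWhile_append_dropWhile (p := fun x => x == a) (l := l)
  have hd : (l.dropWhile (fun x => x == a)).count a = 0 :=
    List.count_eq_zero_of_not_mem (not_mem_dropWhile_eq l a hp hge)
  have ht : (l.takeWhile (fun x => x == a)).count a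
      = (l.takeWhile (fun x => x == a)).length := by
    apply List.count_eq_length.mpr
    intro y hy
    have := List.mem_takeWhile_imp hy
    exact (eq_of_beq this).symm
  calc l.count a = (l.takeWhile (fun x => x == a) ++ l.dropWhile (fun x => x == a)).count a := by
        rw [hsplit]
    _ = _ := by rw [List.count_append, hd, ht]; omega

-- Elements surviving dropWhile (== a) are strictly greater than a.
theorem mem_dropWhile_gt (l : List Int) (a : Int)
    (hp : l.Pairwise (· ≤ ·)) (hge : ∀ y ∈ l, a ≤ y) :
    ∀ x ∈ l.dropWhile (fun x => x == a), a < x := by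
  intro x hx
  have hmem : x ∈ l := (List.dropWhile_sublist _).subset hx
  have h1 : a ≤ x := hge x hmem
  have h2 : x ≠ a := fun h => not_mem_dropWhile_eq l a hp hge (h ▸ hx)
  omega

-- simScore is insensitive to B-elements smaller than everything in A.
theorem simScore_congr (A B B' : List Int)
    (h : ∀ x ∈ A, B.count x = B'.count x) : simScore A B = simScore A B' := by
  unfold simScore
  congr 1
  exact List.map_congr_left (fun x hx => by rw [h x hx])

theorem merge_eq_simScore (n : Nat) :
    ∀ (A B : List Int), A.length + B.length ≤ n →
      A.Pairwise (· ≤ ·) → B.Pairwise (· ≤ ·) →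
      mergeScore A B = simScore A B := by
  induction n with
  | zero =>
      intro A B hlen _ _
      have hA : A = [] := List.eq_nil_of_length_eq_zero (by omega)
      subst hA
      simp [mergeScore, simScore]
  | succ n ih =>
      intro A B hlen hpA hpB
      match A, B with
      | [], B => simp [mergeScore, simScore]
      | (a :: as), [] =>
          simp [mergeScore, simScore]
      | (a :: as), (b :: bs) =>
          have hgeA : ∀ y ∈ as, a ≤ y := (List.pairwise_cons.mp hpA).1
          have hgeB : ∀ y ∈ bs, b ≤ y := (List.pairwise_cons.mp hpB).1
          by_cases hab : a < b
          · -- a < every element of b :: bs, so it contributes 0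
            rw [show mergeScore (a :: as) (b :: bs) = mergeScore as (b :: bs) by
              rw [mergeScore]; simp [hab]]
            rw [ih as (b :: bs) (by simp at hlen ⊢; omega) hpA.of_cons hpB]
            have hcnt : (b :: bs).count a = 0 := by
              apply List.count_eq_zero_of_not_mem
              intro hmem
              rcases List.mem_cons.mp hmem with h | h
              · omega
              · have := hgeB a h; omega
            unfold simScore
            simp [hcnt]
          · by_cases hba : b < a
            · -- b < every element of a :: as, so b is counted by nobody
              rw [show mergeScore (a :: as) (b :: bs) = mergeScore (a :: as) bs by
                rw [mergeScore]; simp [hab, hba]]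
              rw [ih (a :: as) bs (by simp at hlen ⊢; omega) hpA hpB.of_cons]
              apply (simScore_congr _ _ _ _).symm
              intro x hx
              have hax : a ≤ x := by
                rcases List.mem_cons.mp hx with h | h
                · omega
                · exact hgeA x h
              rw [List.count_cons]
              have : ¬ (b = x) := by omega
              simp [this]
            · have hba' : a = b := by omega
              subst hba'
              rw [show mergeScore (a :: as) (a :: bs)
                  = a * (((as.takeWhile (fun x => x == a)).length : Int) + 1)
                      * (((bs.takeWhile (fun x => x == a)).length : Int) + 1)
                      + mergeScore (as.dropWhile (fun x => x == a)) (bs.dropWhile (fun x => x == a)) by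
                rw [mergeScore]; simp]
              set ta := as.takeWhile (fun x => x == a) with hta
              set da := as.dropWhile (fun x => x == a) with hda
              set tb := bs.takeWhile (fun x => x == a) with htb
              set db := bs.dropWhile (fun x => x == a) with hdb
              have hra : as.count a = ta.length := count_eq_run as a hpA.of_cons hgeA
              have hrb : bs.count a = tb.length := count_eq_run bs a hpB.of_cons hgeB
              have hda_len : da.length ≤ as.length := List.length_dropWhile_le _ _
              have hdb_len : db.length ≤ bs.length := List.length_dropWhile_le _ _
              have hpda : da.Pairwise (· ≤ ·) := hpA.of_cons.sublist (List.dropWhile_sublist _)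
              have hpdb : db.Pairwise (· ≤ ·) := hpB.of_cons.sublist (List.dropWhile_sublist _)
              have hrec : mergeScore da db = simScore da db := by
                apply ih da db (by simp at hlen; omega) hpda hpdb
              rw [hrec]
              -- elements of da are > a, so their count in a :: bs equals their count in db
              have hgt : ∀ x ∈ da, a < x := mem_dropWhile_gt as a hpA.of_cons hgeA
              have hscore_tail : simScore da db = simScore da (a :: bs) := by
                apply (simScore_congr _ _ _ _)
                intro x hx
                have hxa : a < x := hgt x hx
                have hsb : bs = tb ++ db := (List.takeWhile_append_dropWhile ..).symm
                rw [List.count_cons, hsb, List.count_append]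
                have htb0 : tb.count x = 0 := by
                  apply List.count_eq_zero_of_not_mem
                  intro hmem
                  have := List.mem_takeWhile_imp hmem
                  simp at this; omega
                have : ¬ (a = x) := by omega
                simp [htb0, this]
              rw [hscore_tail]
              -- now expand simScore (a :: as) (a :: bs) using as = ta ++ da
              have hsa : as = ta ++ da := (List.takeWhile_append_dropWhile ..).symm
              have hcntB : ((a :: bs).count a : Int) = (tb.length : Int) + 1 := by
                rw [List.count_cons_self, hrb]; push_cast; ring
              have hta_all : ∀ x ∈ ta, x = a := by
                intro x hx
                have := List.mem_takeWhile_imp hx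
                simpa using this
              conv_rhs => rw [simScore, hsa]
              rw [show ((a :: (ta ++ da)).map (fun x => x * ((a :: bs).count x : Int)))
                  = (a * ((a :: bs).count a : Int))
                      :: (ta.map (fun x => x * ((a :: bs).count x : Int))
                          ++ da.map (fun x => x * ((a :: bs).count x : Int))) by
                simp]
              rw [List.sum_cons, List.sum_append]
              have hta_map : ta.map (fun x => x * ((a :: bs).count x : Int))
                  = ta.map (fun _ => a * ((a :: bs).count a : Int)) := by
                apply List.map_congr_left
                intro x hx
                rw [hta_all x hx]
              rw [hta_map]
              simp only [List.map_const', List.sum_replicate, hcntB]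
              have hfold : (da.map (fun x => x * ((a :: bs).count x : Int))).sum
                  = simScore da db := by rw [hscore_tail]; rfl
              rw [hfold]
              rw [hscore_tail]
              ring

-- A's side equals the similarity sum.
theorem solveA_eq (first second : List Int) : solve_two first second = simScore first second := by
  unfold solve_two
  have hA : (fun (second_answer elt : Int) =>
      match (second.foldl (fun d elt => d.insert elt ((PySem.List.count second elt : Int))) PySem.Dict.empty).get? elt with
      | some c => second_answer + elt * c
      | none => second_answer)
      = (fun (second_answer elt : Int) =>
      match (if elt ∈ second then some ((PySem.List.count second elt : Int)) else none) with
      | some c => second_answer + elt * c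
      | none => second_answer) := by
    funext acc elt
    rw [getA_dict (fun e => ((PySem.List.count second e : Int)))]
    simp
  simp only []
  rw [hA, foldA, zero_add]
  rfl

-- B's side: sorting preserves the similarity sum (permutation on both arguments).
theorem solveB_eq (first second : List Int) : solve_two_alt first second = simScore first second := by
  unfold solve_two_alt
  have hpf := PySem.List.sorted_perm (xs := first) (key := fun x : Int => x) (rev := false)
  have hps := PySem.List.sorted_perm (xs := second) (key := fun x : Int => x) (rev := false)
  rw [merge_eq_simScore
        ((PySem.List.sorted first (fun x => x) false).length + (PySem.List.sorted second (fun x => x) false).length)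
        _ _ le_rfl
        (by simpa using PySem.List.sorted_pairwise (xs := first) (key := fun x : Int => x))
        (by simpa using PySem.List.sorted_pairwise (xs := second) (key := fun x : Int => x))]
  unfold simScore
  have hcnt : ∀ x : Int, (PySem.List.sorted second (fun y => y) false).count x = second.count x :=
    fun x => hps.count_eq x
  have hmap : (PySem.List.sorted first (fun x => x) false).map
        (fun x => x * (((PySem.List.sorted second (fun y => y) false).count x : Int)))
      = (PySem.List.sorted first (fun x => x) false).map (fun x => x * ((second.count x : Int))) := by
    apply List.map_congr_left
    intro x _
    rw [hcnt x]
  rw [hmap]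
  exact (hpf.map (fun x => x * ((second.count x : Int)))).sum_eq

theorem main_eq (first second : List Int) :
    solve_two first second = solve_two_alt first second := by
  rw [solveA_eq, solveB_eq]

-- ===== VERDICT (by name: the statement is the Claim_ definition above) =====
theorem solve_two_spec : Claim_equal_solve_two := by
  intro f s _
  exact main_eq f s
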